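-- pv_equiv track=rewrite | github.com/dywisor/fischstaebchen | scripts/check-shell-frec.py | filter_escaped
-- ===== SOURCE A (Python) =====
-- def filter_escaped ( seq ):
--    bs = chr(0x5c)
--
--    blind = False
--    for c in seq:
--       if blind:
--          blind = False
--       elif c == bs:
--          blind = True
--       else:
--          yield c
-- ===== SOURCE B (Python) =====
-- def filter_escaped(seq):
--     # find-and-slice: jump from backslash to backslash with str.find and
--     # emit the whole unescaped chunk between them, skipping bs + escaped char.
--     bs = chr(0x5c)
--     s = ''.join(seq)
--     i = 0
--     while True:
--         j = s.find(bs, i)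
--         if j < 0:
--             yield from s[i:]
--             return
--         yield from s[i:j]
--         i = j + 2
-- ===== Notes on version B (the rewrite author's own statement) =====
-- stated objective: alternative
-- what changed: Instead of a per-character loop with a blind flag, B joins the input once and jumps between backslash positions with str.find, yielding whole unescaped slices and skipping two positions past each backslash.
import Mathlib
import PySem

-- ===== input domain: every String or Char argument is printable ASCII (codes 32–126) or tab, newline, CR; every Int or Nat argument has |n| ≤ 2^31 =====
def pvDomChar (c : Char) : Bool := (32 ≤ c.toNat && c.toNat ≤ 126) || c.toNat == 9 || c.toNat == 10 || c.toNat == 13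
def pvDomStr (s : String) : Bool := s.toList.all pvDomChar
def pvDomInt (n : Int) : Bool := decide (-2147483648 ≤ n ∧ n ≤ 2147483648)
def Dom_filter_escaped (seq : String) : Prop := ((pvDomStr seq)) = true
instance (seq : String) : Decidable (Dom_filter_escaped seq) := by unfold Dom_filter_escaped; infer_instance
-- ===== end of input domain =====

-- B replaces the per-character blind-flag loop by find-and-slice: jump to the next
-- backslash, emit the whole unescaped chunk before it, skip two positions (alternative).

-- ===== PORT A =====
-- A: single pass carrying a boolean 'blind' flag across turns; yields collected in order.
def filter_escaped (seq : String) : List String :=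
  (seq.toList.foldl
    (fun (st : Bool × List String) c =>
      if st.1 then (false, st.2)
      else if c = Char.ofNat 0x5c then (true, st.2)
      else (false, st.2 ++ [String.ofList [c]]))
    (false, [])).2

-- ===== PORT B =====
-- B: find the next backslash (s.find = dropWhile, the slice before it = takeWhile),
-- yield that chunk char by char, continue two positions past the backslash (i = j + 2).
def filter_escaped_goB (cs : List Char) : List String :=
  let rest := cs.dropWhile (fun c => c ≠ Char.ofNat 0x5c)
  if rest.isEmpty then
    cs.map (fun c => String.ofList [c])                        -- no backslash: yield rest, return
  else
    (cs.takeWhile (fun c => c ≠ Char.ofNat 0x5c)).map (fun c => String.ofList [c])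
      ++ filter_escaped_goB ((rest.drop 1).drop 1)             -- i = j + 2
termination_by cs.length
decreasing_by
  rename_i hne
  rw [List.isEmpty_iff] at hne
  have h2 : 0 < (cs.dropWhile (fun c => decide (c ≠ Char.ofNat 0x5c))).length :=
    List.length_pos_of_ne_nil hne
  have h1 : (cs.dropWhile (fun c => decide (c ≠ Char.ofNat 0x5c))).length ≤ cs.length :=
    List.length_dropWhile_le _ _
  simp only [List.length_drop]
  omega

def filter_escaped_alt (seq : String) : List String :=
  filter_escaped_goB seq.toList

-- ===== PRECONDITION & SPEC =====
def Spec_filter_escaped (seq : String) (out : List String) : Prop := out = filter_escaped_alt seq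
instance (seq : String) (out : List String) : Decidable (Spec_filter_escaped seq out) := by unfold Spec_filter_escaped; infer_instance

-- ===== CLAIM (what is proved, stated in full; the proofs are below) =====
def Claim_equal_filter_escaped : Prop := ∀ (seq : String), Dom_filter_escaped seq → Spec_filter_escaped seq (filter_escaped seq)

-- ===== LEMMAS AND PROOFS =====
-- Proof-side helper: the per-character recursion both ports simplify to.
def pvGo : List Char → List String
  | [] => []
  | c :: rest =>
    if c = Char.ofNat 0x5c then
      match rest with
      | [] => []
      | _ :: rest' => pvGo rest'
    else String.ofList [c] :: pvGo rest

-- A's fold computes pvGo.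
theorem filter_escaped_fold_inv (cs : List Char) : ∀ (acc : List String),
    (cs.foldl
      (fun (st : Bool × List String) c =>
        if st.1 then (false, st.2)
        else if c = Char.ofNat 0x5c then (true, st.2)
        else (false, st.2 ++ [String.ofList [c]]))
      (false, acc)).2 = acc ++ pvGo cs
    ∧
    (cs.foldl
      (fun (st : Bool × List String) c =>
        if st.1 then (false, st.2)
        else if c = Char.ofNat 0x5c then (true, st.2)
        else (false, st.2 ++ [String.ofList [c]]))
      (true, acc)).2 = acc ++ pvGo cs.tail := by
  induction cs with
  | nil => intro acc; simp [pvGo]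
  | cons c r ih =>
    intro acc
    constructor
    · by_cases h : c = Char.ofNat 0x5c
      · simp only [List.foldl_cons, h]
        norm_num
        rw [(ih acc).2]
        cases r <;> simp [pvGo]
      · simp only [List.foldl_cons]
        simp [h, (ih (acc ++ [String.ofList [c]])).1]
        conv_rhs => rw [show pvGo (c :: r) = String.ofList [c] :: pvGo r from by
          rw [pvGo.eq_def]; simp [h]]
    · simp only [List.foldl_cons]
      simp [(ih acc).1]

theorem goB_nil : filter_escaped_goB [] = [] := by
  conv_lhs => unfold filter_escaped_goB
  simp

theorem goB_cons_bs (r : List Char) :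
    filter_escaped_goB (Char.ofNat 0x5c :: r) = filter_escaped_goB (r.drop 1) := by
  conv_lhs => unfold filter_escaped_goB
  simp [List.dropWhile, List.takeWhile]

theorem goB_cons (c : Char) (r : List Char) (h : c ≠ Char.ofNat 0x5c) :
    filter_escaped_goB (c :: r) = String.ofList [c] :: filter_escaped_goB r := by
  have hd : (decide (c ≠ Char.ofNat 0x5c)) = true := by simpa using h
  conv_lhs => unfold filter_escaped_goB
  conv_rhs => unfold filter_escaped_goB
  simp [List.dropWhile, List.takeWhile, h, List.isEmpty_iff]
  split_ifs <;> rfl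

theorem goB_eq_go : ∀ (n : Nat) (cs : List Char), cs.length ≤ n →
    filter_escaped_goB cs = pvGo cs := by
  intro n
  induction n with
  | zero =>
    intro cs hl
    have : cs = [] := List.eq_nil_of_length_eq_zero (Nat.le_zero.mp hl)
    simp [this, goB_nil, pvGo]
  | succ n ih =>
    intro cs hl
    match cs with
    | [] => simp [goB_nil, pvGo]
    | c :: r =>
      by_cases h : c = Char.ofNat 0x5c
      · subst h
        rw [goB_cons_bs]
        match r with
        | [] => simp [goB_nil, pvGo]
        | x :: r' =>
          simp only [List.drop_succ_cons, List.drop_zero]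
          rw [ih r' (by simp at hl; omega)]
          conv_rhs => rw [pvGo.eq_def]
          simp
      · rw [goB_cons c r h, ih r (by simp at hl; omega)]
        conv_rhs => rw [pvGo.eq_def]
        simp [h]

-- ===== VERDICT (by name: the statement is the Claim_ definition above) =====
theorem filter_escaped_spec : Claim_equal_filter_escaped := by
  intro seq _
  unfold Spec_filter_escaped filter_escaped filter_escaped_alt
  rw [goB_eq_go seq.toList.length seq.toList le_rfl]
  simpa using (filter_escaped_fold_inv seq.toList []).1
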